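-- pv_equiv track=rewrite | github.com/oldwizard7/advisor-ledger | scripts/bootstrap_mirror.py | paragraphs_to_md
-- ===== SOURCE A (Python) =====
-- STYLE_MAP = {
--     "TITLE": "# ",
--     "SUBTITLE": "## ",
--     "HEADING_1": "# ",
--     "HEADING_2": "## ",
--     "HEADING_3": "### ",
--     "HEADING_4": "#### ",
--     "HEADING_5": "##### ",
--     "HEADING_6": "###### ",
-- }
--
-- def paragraphs_to_md(paragraphs: list[dict]) -> str:
--     lines: list[str] = []
--     for p in paragraphs:
--         text = p.get("text", "")
--         style = p.get("style", "NORMAL_TEXT")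
--         prefix = STYLE_MAP.get(style, "")
--         if not text:
--             lines.append("")
--             continue
--         lines.append(f"{prefix}{text}")
--     # collapse >2 consecutive blank lines
--     out: list[str] = []
--     blank_run = 0
--     for ln in lines:
--         if ln == "":
--             blank_run += 1
--             if blank_run <= 2:
--                 out.append(ln)
--         else:
--             blank_run = 0
--             out.append(ln)
--     return "\n".join(out).rstrip() + "\n"
-- ===== SOURCE B (Python) =====
-- STYLE_MAP = {
--     "TITLE": "# ",
--     "SUBTITLE": "## ",
--     "HEADING_1": "# ",
--     "HEADING_2": "## ",
--     "HEADING_3": "### ",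
--     "HEADING_4": "#### ",
--     "HEADING_5": "##### ",
--     "HEADING_6": "###### ",
-- }
--
-- def paragraphs_to_md(paragraphs: list[dict]) -> str:
--     # single pass: format and collapse >2 consecutive blanks at once
--     out: list[str] = []
--     blank_run = 0
--     for p in paragraphs:
--         text = p.get("text", "")
--         if not text:
--             blank_run += 1
--             if blank_run <= 2:
--                 out.append("")
--         else:
--             blank_run = 0
--             prefix = STYLE_MAP.get(p.get("style", "NORMAL_TEXT"), "")
--             out.append(prefix + text)
--     return "\n".join(out).rstrip() + "\n"
-- ===== Notes on version B (the rewrite author's own statement) =====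
-- stated objective: simpler
-- what changed: Fuses A's two sequential passes (format all paragraphs into an intermediate lines list, then re-scan it to collapse blank runs) into one pass that maintains a blank_run counter and emits directly into out, dropping the intermediate list.
import Mathlib
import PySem

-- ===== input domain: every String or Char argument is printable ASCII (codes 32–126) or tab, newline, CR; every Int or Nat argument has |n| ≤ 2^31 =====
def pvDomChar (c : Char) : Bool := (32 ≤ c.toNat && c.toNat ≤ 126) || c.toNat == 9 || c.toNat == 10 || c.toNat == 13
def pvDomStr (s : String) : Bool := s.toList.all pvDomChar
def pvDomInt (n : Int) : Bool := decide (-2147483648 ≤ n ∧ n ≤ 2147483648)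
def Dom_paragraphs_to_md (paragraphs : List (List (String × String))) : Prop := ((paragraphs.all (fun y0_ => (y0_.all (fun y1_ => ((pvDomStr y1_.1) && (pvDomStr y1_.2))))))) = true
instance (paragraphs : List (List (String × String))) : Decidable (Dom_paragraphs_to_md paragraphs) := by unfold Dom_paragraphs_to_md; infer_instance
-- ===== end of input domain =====

-- B fuses A's two passes (format lines, then collapse blank runs) into one pass with a blank-run counter; simpler, same cost.


-- ===== PORT A =====
def pvStyleMap : PySem.Dict String String :=
  PySem.Dict.mk [("TITLE", "# "), ("SUBTITLE", "## "), ("HEADING_1", "# "),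
    ("HEADING_2", "## "), ("HEADING_3", "### "), ("HEADING_4", "#### "),
    ("HEADING_5", "##### "), ("HEADING_6", "###### ")]

def paragraphs_to_md (paragraphs : List (List (String × String))) : String :=
  -- first loop: build the intermediate `lines` list
  let lines : List String := paragraphs.foldl (fun lines p =>
    let text := (PySem.Dict.mk p).getD "text" ""
    let style := (PySem.Dict.mk p).getD "style" "NORMAL_TEXT"
    let pfx := pvStyleMap.getD style ""
    if text = "" then lines ++ [""] else lines ++ [pfx ++ text]) []
  -- second loop: collapse >2 consecutive blank lines
  let st : List String × Int := lines.foldl (fun (st : List String × Int) ln =>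
    if ln = "" then
      let br := st.2 + 1
      (if br ≤ 2 then st.1 ++ [ln] else st.1, br)
    else (st.1 ++ [ln], 0)) ([], 0)
  PySem.Str.rstrip (PySem.Str.join "\n" st.1) ++ "\n"

-- ===== PORT B =====
def paragraphs_to_md_alt (paragraphs : List (List (String × String))) : String :=
  -- single pass: format and collapse blank runs at once
  let st : List String × Int := paragraphs.foldl (fun (st : List String × Int) p =>
    let text := (PySem.Dict.mk p).getD "text" ""
    if text = "" then
      let br := st.2 + 1
      (if br ≤ 2 then st.1 ++ [""] else st.1, br)
    else
      let pfx := pvStyleMap.getD ((PySem.Dict.mk p).getD "style" "NORMAL_TEXT") ""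
      (st.1 ++ [pfx ++ text], 0)) ([], 0)
  PySem.Str.rstrip (PySem.Str.join "\n" st.1) ++ "\n"

-- ===== PRECONDITION & SPEC =====
def Spec_paragraphs_to_md (paragraphs : List (List (String × String))) (out : String) : Prop := out = paragraphs_to_md_alt paragraphs
instance (paragraphs : List (List (String × String))) (out : String) : Decidable (Spec_paragraphs_to_md paragraphs out) := by unfold Spec_paragraphs_to_md; infer_instance

-- ===== CLAIM (what is proved, stated in full; the proofs are below) =====
def Claim_equal_paragraphs_to_md : Prop := ∀ (paragraphs : List (List (String × String))), Dom_paragraphs_to_md paragraphs → Spec_paragraphs_to_md paragraphs (paragraphs_to_md paragraphs)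

-- ===== LEMMAS AND PROOFS =====

-- A's line for one paragraph
def pvLineOf (p : List (String × String)) : String :=
  let text := (PySem.Dict.mk p).getD "text" ""
  let style := (PySem.Dict.mk p).getD "style" "NORMAL_TEXT"
  let pfx := pvStyleMap.getD style ""
  if text = "" then "" else pfx ++ text

lemma pvLines_eq_map (paragraphs : List (List (String × String))) (acc : List String) :
    (paragraphs.foldl (fun lines p =>
      let text := (PySem.Dict.mk p).getD "text" ""
      let style := (PySem.Dict.mk p).getD "style" "NORMAL_TEXT"
      let pfx := pvStyleMap.getD style ""
      if text = "" then lines ++ [""] else lines ++ [pfx ++ text]) acc) =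
    acc ++ paragraphs.map pvLineOf := by
  induction paragraphs generalizing acc with
  | nil => simp
  | cons p ps ih =>
    simp only [List.foldl_cons, List.map_cons, ih, pvLineOf]
    split_ifs <;> simp

lemma pvAppend_ne_empty (a b : String) (hb : b ≠ "") : a ++ b ≠ "" := by
  intro h
  apply hb
  have : (a ++ b).toList = "".toList := by rw [h]
  simp at this
  exact String.toList_inj.mp (by simp [this.2])

lemma pvFuse (paragraphs : List (List (String × String))) (st : List String × Int) :
    ((paragraphs.map pvLineOf).foldl (fun (st : List String × Int) ln =>
      if ln = "" then
        let br := st.2 + 1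
        (if br ≤ 2 then st.1 ++ [ln] else st.1, br)
      else (st.1 ++ [ln], 0)) st) =
    paragraphs.foldl (fun (st : List String × Int) p =>
      let text := (PySem.Dict.mk p).getD "text" ""
      if text = "" then
        let br := st.2 + 1
        (if br ≤ 2 then st.1 ++ [""] else st.1, br)
      else
        let pfx := pvStyleMap.getD ((PySem.Dict.mk p).getD "style" "NORMAL_TEXT") ""
        (st.1 ++ [pfx ++ text], 0)) st := by
  induction paragraphs generalizing st with
  | nil => rfl
  | cons p ps ih =>
    simp only [List.map_cons, List.foldl_cons]
    rw [ih]
    congr 1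
    simp only [pvLineOf]
    by_cases h : (PySem.Dict.mk p).getD "text" "" = ""
    · simp [h]
    · simp [h, pvAppend_ne_empty _ _ h]

-- ===== VERDICT (by name: the statement is the Claim_ definition above) =====
theorem paragraphs_to_md_spec : Claim_equal_paragraphs_to_md := by
  intro paragraphs _
  unfold Spec_paragraphs_to_md paragraphs_to_md paragraphs_to_md_alt
  simp only [pvLines_eq_map, List.nil_append, pvFuse]
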